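-- pv_equiv track=rewrite | github.com/yannick-mayeur/GroupSplit | BFM.py | bruteForceRepatition
-- ===== SOURCE A (Python) =====
-- import itertools
--
-- def bruteForceRepatition(personnes):
--     i = 0
--     res = []
--     for group in list(itertools.combinations(personnes, r = 3)):
--         group = list(group)
--         pCopy = [x for x in personnes if x not in group]
--         for item in list(itertools.combinations(pCopy, r = 3)):
--             item = list(item)
--             seen = (group + item)
--             pCopy2 = [x for x in personnes if x not in seen]
--             for item2 in list(itertools.combinations(pCopy2, r = 3)):
--                 item2 = list(item2)
--                 seen = (group + item + item2)
--                 pCopy3 = [x for x in personnes if x not in seen]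
--                 for item3 in list(itertools.combinations(pCopy3, r = 2)):
--                     item3 = list(item3)
--                     i += 1
--                     res.append([group, item, item2, item3])
--     return res
-- ===== SOURCE B (Python) =====
-- import itertools
--
-- def bruteForceRepatition(personnes):
--     def gen(sizes, remaining):
--         if not sizes:
--             return [[]]
--         out = []
--         for group in itertools.combinations(remaining, sizes[0]):
--             group = list(group)
--             rest = [x for x in remaining if x not in group]
--             for sub in gen(sizes[1:], rest):
--                 out.append([group] + sub)
--         return out
--     return gen([3, 3, 3, 2], personnes)
-- ===== Notes on version B (the rewrite author's own statement) =====
-- stated objective: simpler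
-- what changed: Replaces A's four hard-coded nested loops (each recomputing the remaining people from the full list with a concatenated 'seen' list) by a single recursive helper over the size list [3,3,3,2] that filters the remaining list incrementally.
import Mathlib
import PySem

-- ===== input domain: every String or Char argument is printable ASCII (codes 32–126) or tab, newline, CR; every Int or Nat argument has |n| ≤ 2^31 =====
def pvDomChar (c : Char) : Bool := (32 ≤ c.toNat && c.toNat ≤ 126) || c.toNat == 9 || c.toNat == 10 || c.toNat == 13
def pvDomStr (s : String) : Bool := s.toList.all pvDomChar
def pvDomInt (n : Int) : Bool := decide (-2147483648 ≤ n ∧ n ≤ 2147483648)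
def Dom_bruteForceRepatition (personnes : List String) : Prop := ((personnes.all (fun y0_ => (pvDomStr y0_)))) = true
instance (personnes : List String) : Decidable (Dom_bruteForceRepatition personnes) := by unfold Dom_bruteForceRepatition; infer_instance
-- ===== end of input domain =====

-- B replaces A's four hard-coded nested loops by one recursion over the size list [3,3,3,2] (simpler decomposition, same cost).

-- itertools.combinations(xs, r): all r-subsequences of xs in lexicographic index order (shared library helper for both ports)
def combos {α : Type} : Nat → List α → List (List α)
  | 0, _ => [[]]
  | _ + 1, [] => []
  | r + 1, x :: xs => (combos r xs).map (fun c => x :: c) ++ combos (r + 1) xs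

-- ===== PORT A =====
-- literal port of A's four nested for-loops with the res accumulator (the dead counter i is omitted)
def bruteForceRepatition (personnes : List String) : List (List (List String)) :=
  (combos 3 personnes).foldl (fun res group =>
    let pCopy := personnes.filter (fun x => !group.contains x)
    (combos 3 pCopy).foldl (fun res item =>
      let seen := group ++ item
      let pCopy2 := personnes.filter (fun x => !seen.contains x)
      (combos 3 pCopy2).foldl (fun res item2 =>
        let seen := group ++ item ++ item2
        let pCopy3 := personnes.filter (fun x => !seen.contains x)
        (combos 2 pCopy3).foldl (fun res item3 =>
          res ++ [[group, item, item2, item3]]) res) res) res) []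

-- ===== PORT B =====
-- recursion over the list of group sizes, as in Source B's gen(sizes, remaining)
def genSizes (sizes : List Nat) (remaining : List String) : List (List (List String)) :=
  match sizes with
  | [] => [[]]
  | s :: rest =>
    (combos s remaining).flatMap (fun group =>
      (genSizes rest (remaining.filter (fun x => !group.contains x))).map (fun sub => group :: sub))

def bruteForceRepatition_alt (personnes : List String) : List (List (List String)) :=
  genSizes [3, 3, 3, 2] personnes

-- ===== PRECONDITION & SPEC =====
def Spec_bruteForceRepatition (personnes : List String) (out : List (List (List String))) : Prop := out = bruteForceRepatition_alt personnes
instance (personnes : List String) (out : List (List (List String))) : Decidable (Spec_bruteForceRepatition personnes out) := by unfold Spec_bruteForceRepatition; infer_instance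

-- ===== CLAIM (what is proved, stated in full; the proofs are below) =====
def Claim_equal_bruteForceRepatition : Prop := ∀ (personnes : List String), Dom_bruteForceRepatition personnes → Spec_bruteForceRepatition personnes (bruteForceRepatition personnes)

-- ===== LEMMAS AND PROOFS =====

-- filtering by a concatenated 'seen' list = filtering by its parts in succession
theorem filter_contains_append (p a b : List String) :
    p.filter (fun x => !(a ++ b).contains x)
      = (p.filter (fun x => !a.contains x)).filter (fun x => !b.contains x) := by
  rw [List.filter_filter]
  apply List.filter_congr
  intro x _
  simp [Bool.and_comm]

theorem bruteForceRepatition_spec' (personnes : List String) :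
    bruteForceRepatition personnes = bruteForceRepatition_alt personnes := by
  unfold bruteForceRepatition bruteForceRepatition_alt
  simp only [genSizes, PySem.List.foldl_append_eq_flatMap, filter_contains_append,
    List.nil_append, List.map_flatMap, List.map_cons, List.map_nil]

-- ===== VERDICT (by name: the statement is the Claim_ definition above) =====
theorem bruteForceRepatition_spec : Claim_equal_bruteForceRepatition := by
  intro personnes _
  exact bruteForceRepatition_spec' personnes
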